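-- pv_equiv track=rewrite | github.com/981377660LMT/algorithm-study | 21_位运算/SelectPow2.py | selectPow2
-- ===== SOURCE A (Python) =====
-- from typing import List
--
-- def selectPow2(k: int, target: int) -> List[int]:
--     """
--     从1,2,4,...中选出k个数,每个数可以选择无数次(可以组成[k,k*(2^n)]中任意一个数).
--     返回一组选择方案,使得和为target,如果不存在,返回空列表.
--     """
--     if k > target or k < target.bit_count():
--         return []
--
--     counter = [0] * 100
--     count = 0
--     for bit in range(len(counter)):
--         if target & (1 << bit):
--             counter[bit] = 1
--             count += 1
--
--     for i in range(len(counter) - 1, -1, -1):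
--         if i > 0:
--             diff = k - count
--             min_ = min(diff, counter[i])
--             counter[i] -= min_
--             counter[i - 1] += min_ * 2
--             count += min_
--
--     res = []
--     for i in range(len(counter)):
--         res += [1 << i] * counter[i]
--     return res
-- ===== SOURCE B (Python) =====
-- from typing import List
--
-- def selectPow2(k: int, target: int) -> List[int]:
--     if k > target or k < target.bit_count():
--         return []
--     if target == 0:
--         return []
--     # find the split level L: the highest level where the greedy largest-first
--     # splitting stops, located arithmetically instead of sweeping a counter array
--     L = target.bit_length()
--     while L > 0 and k >= 2 * (target >> L) + (target & ((1 << L) - 1)).bit_count():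
--         L -= 1
--     m = k - (target >> L) - (target & ((1 << L) - 1)).bit_count()
--     res = [1 << i for i in range(L - 1) if target >> i & 1]
--     if L >= 1:
--         res += [1 << (L - 1)] * (((target >> (L - 1)) & 1) + 2 * m)
--     res += [1 << L] * ((target >> L) - m)
--     return res
-- ===== Notes on version B (the rewrite author's own statement) =====
-- stated objective: alternative
-- what changed: B replaces A's fixed 100-cell counter array and its three full sweeps (bit extraction, top-down splitting, reassembly) by arithmetic on the number itself: it locates the greedy split level L with a short threshold search on shifted values and popcounts, computes the number of splits m in closed form, and builds the answer directly from target's low bits plus two replicate blocks at levels L-1 and L.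
import Mathlib
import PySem

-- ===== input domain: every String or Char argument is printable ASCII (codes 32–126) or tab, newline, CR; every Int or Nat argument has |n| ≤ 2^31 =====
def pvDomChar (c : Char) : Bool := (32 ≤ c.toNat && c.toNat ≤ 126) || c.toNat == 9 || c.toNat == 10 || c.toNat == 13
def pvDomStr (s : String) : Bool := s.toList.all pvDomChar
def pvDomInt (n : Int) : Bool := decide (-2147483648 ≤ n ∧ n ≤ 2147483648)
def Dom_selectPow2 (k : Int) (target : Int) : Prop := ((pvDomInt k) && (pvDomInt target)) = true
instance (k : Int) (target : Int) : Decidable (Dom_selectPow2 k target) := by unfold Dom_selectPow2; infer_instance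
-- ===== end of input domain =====

-- B replaces A's fixed 100-cell counter sweeps by a direct arithmetic computation of the
-- greedy split level and a closed-form assembly of the result (objective: alternative).

-- ===== PORT A =====
-- helper shared by both ports: Python's int.bit_count() (= popcount of |n|); exact
def natOnes (n : Nat) : Nat :=
  if n = 0 then 0 else n % 2 + natOnes (n / 2)
decreasing_by exact Nat.div_lt_self (Nat.pos_of_ne_zero (by assumption)) (by norm_num)

-- body of A's first loop: `if target & (1 << bit): counter[bit] = 1; count += 1`
-- (`target & (1 << bit)` ported as testBit of |target|: exact, since the loop is only
-- reached when the guard passed, which forces target ≥ 0)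
def pvLoop1 (target : Int) (st : List Int × Int) (bit : Nat) : List Int × Int :=
  if target.natAbs.testBit bit then (st.1.set bit 1, st.2 + 1) else st

-- body of A's second loop (i from 99 down to 0)
def pvLoop2 (k : Int) (st : List Int × Int) (i : Nat) : List Int × Int :=
  if i > 0 then
    let diff := k - st.2
    let min_ := min diff (st.1.getD i 0)
    let c1 := st.1.set i (st.1.getD i 0 - min_)
    (c1.set (i - 1) (c1.getD (i - 1) 0 + min_ * 2), st.2 + min_)
  else st

def selectPow2 (k : Int) (target : Int) : List Int :=
  if k > target ∨ k < (natOnes target.natAbs : Int) then []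
  else
    let st1 := (List.range 100).foldl (pvLoop1 target) (List.replicate 100 0, 0)
    let st2 := (List.range 100).reverse.foldl (pvLoop2 k) st1
    (List.range 100).foldl (fun res i => res ++ List.replicate (st2.1.getD i 0).toNat ((2 : Int) ^ i)) []

-- ===== PORT B =====
-- B's while loop `while L > 0 and k >= 2*(target>>L) + (target & ((1<<L)-1)).bit_count(): L -= 1`
def findL (k : Int) (t : Nat) : Nat → Nat
  | 0 => 0
  | (L + 1) =>
    if 2 * ((t >>> (L + 1) : Nat) : Int) + (natOnes (t % 2 ^ (L + 1)) : Int) ≤ k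
    then findL k t L else L + 1

def selectPow2_alt (k : Int) (target : Int) : List Int :=
  if k > target ∨ k < (natOnes target.natAbs : Int) then []
  else if target = 0 then []
  else
    let t := target.natAbs
    let L := findL k t t.size          -- t.size = target.bit_length()
    let m := k - ((t >>> L : Nat) : Int) - (natOnes (t % 2 ^ L) : Int)
    let low := (List.range (L - 1)).foldl
      (fun res i => if t.testBit i then res ++ [(2 : Int) ^ i] else res) []
    let mid := if 1 ≤ L then
        List.replicate ((if t.testBit (L - 1) then (1 : Int) else 0) + 2 * m).toNat ((2 : Int) ^ (L - 1))
      else []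
    low ++ mid ++ List.replicate (((t >>> L : Nat) : Int) - m).toNat ((2 : Int) ^ L)

-- ===== PRECONDITION & SPEC =====
def Spec_selectPow2 (k : Int) (target : Int) (out : List Int) : Prop := out = selectPow2_alt k target
instance (k : Int) (target : Int) (out : List Int) : Decidable (Spec_selectPow2 k target out) := by unfold Spec_selectPow2; infer_instance

-- ===== CLAIM (what is proved, stated in full; the proofs are below) =====
def Claim_equal_selectPow2 : Prop := ∀ (k : Int) (target : Int), Dom_selectPow2 k target → Spec_selectPow2 k target (selectPow2 k target)

-- ===== LEMMAS AND PROOFS =====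

-- abbreviations used throughout the proof (t stands for target.natAbs)
def bitI (t i : Nat) : Int := if t.testBit i then 1 else 0
def sI (t i : Nat) : Int := ((t >>> i : Nat) : Int)
def pcl (t i : Nat) : Int := (natOnes (t % 2 ^ i) : Int)
-- number of pieces after fully splitting all of t's bits down to level i, counting
-- the untouched bits below i as well
def FI (t i : Nat) : Int := 2 * sI t i + pcl t i

theorem natOnes_zero : natOnes 0 = 0 := by
  rw [natOnes]; norm_num

theorem natOnes_one : natOnes 1 = 1 := by
  rw [natOnes]; norm_num [natOnes_zero]

theorem natOnes_unfold (n : Nat) : natOnes n = n % 2 + natOnes (n / 2) := by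
  rw [natOnes]
  split_ifs with h
  · subst h; norm_num [natOnes_zero]
  · rfl

theorem natOnes_add_pow (i a b : Nat) (h : a < 2 ^ i) :
    natOnes (a + 2 ^ i * b) = natOnes a + natOnes b := by
  induction i generalizing a b with
  | zero =>
    interval_cases a
    simp [natOnes_zero]
  | succ i ih =>
    have h3 : 2 ^ (i + 1) * b = 2 * (2 ^ i * b) := by ring
    have h2 : 2 ^ (i + 1) = 2 * 2 ^ i := by ring
    rw [h3]
    have hmod : (a + 2 * (2 ^ i * b)) % 2 = a % 2 := by omega
    have hdiv : (a + 2 * (2 ^ i * b)) / 2 = a / 2 + 2 ^ i * b := by omega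
    have ha2 : a / 2 < 2 ^ i := by omega
    rw [natOnes_unfold (a + 2 * (2 ^ i * b)), hmod, hdiv, ih (a / 2) b ha2,
      natOnes_unfold a]
    omega

theorem sI_succ (t i : Nat) : sI t i = 2 * sI t (i + 1) + bitI t i := by
  unfold sI bitI
  rw [Nat.shiftRight_eq_div_pow, Nat.shiftRight_eq_div_pow, Nat.testBit_eq_decide_div_mod_eq]
  have hdd : t / 2 ^ (i + 1) = t / 2 ^ i / 2 := by
    rw [Nat.div_div_eq_div_mul, pow_succ]
  rw [hdd]
  rcases Nat.mod_two_eq_zero_or_one (t / 2 ^ i) with h | h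
  · have hn : t / 2 ^ i = 2 * (t / 2 ^ i / 2) := by omega
    simp only [h, decide_eq_true_eq]
    norm_num
    exact_mod_cast hn
  · have hn : t / 2 ^ i = 2 * (t / 2 ^ i / 2) + 1 := by omega
    simp only [h, decide_eq_true_eq]
    norm_num
    exact_mod_cast hn

theorem pcl_succ (t i : Nat) : pcl t (i + 1) = pcl t i + bitI t i := by
  unfold pcl bitI
  rw [Nat.mod_pow_succ, natOnes_add_pow i _ _ (Nat.mod_lt _ (Nat.two_pow_pos i)),
    Nat.testBit_eq_decide_div_mod_eq]
  rcases Nat.mod_two_eq_zero_or_one (t / 2 ^ i) with h | h <;>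
    rw [h] <;> simp [natOnes_zero, natOnes_one]

theorem FI_shift (t i : Nat) : sI t i + pcl t i = FI t (i + 1) := by
  unfold FI
  have h1 := sI_succ t i
  have h2 := pcl_succ t i
  omega

theorem sI_zero_of_lt (t i : Nat) (h : t < 2 ^ i) : sI t i = 0 := by
  unfold sI
  rw [Nat.shiftRight_eq_div_pow, Nat.div_eq_of_lt h]
  rfl

theorem pcl_of_lt (t i : Nat) (h : t < 2 ^ i) : pcl t i = (natOnes t : Int) := by
  unfold pcl
  rw [Nat.mod_eq_of_lt h]

theorem bitI_zero_of_lt (t i : Nat) (h : t < 2 ^ i) : bitI t i = 0 := by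
  unfold bitI
  rw [Nat.testBit_eq_decide_div_mod_eq, Nat.div_eq_of_lt h]
  simp

theorem bitI_nonneg (t i : Nat) : 0 ≤ bitI t i := by
  unfold bitI; split_ifs <;> norm_num

theorem FI_one (t : Nat) : FI t 1 = (t : Int) := by
  have h := FI_shift t 0
  unfold sI pcl at h
  simp [Nat.shiftRight_zero, Nat.mod_one, natOnes_zero] at h
  exact h.symm

-- findL facts
theorem findL_le (k : Int) (t n : Nat) : findL k t n ≤ n := by
  induction n with
  | zero => simp [findL]
  | succ n ih =>
    rw [findL]
    split_ifs
    · omega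
    · omega

theorem findL_ge (k : Int) (t n : Nat) :
    ∀ j, findL k t n < j → j ≤ n → FI t j ≤ k := by
  induction n with
  | zero => intro j h1 h2; omega
  | succ n ih =>
    intro j h1 h2
    rw [findL] at h1
    split_ifs at h1 with hc
    · rcases Nat.lt_or_ge j (n + 1) with hj | hj
      · exact ih j h1 (by omega)
      · have : j = n + 1 := by omega
        subst this
        unfold FI sI pcl
        exact hc
    · omega

theorem findL_lt (k : Int) (t n : Nat) :
    findL k t n = 0 ∨ k < FI t (findL k t n) := by
  induction n with
  | zero => left; simp [findL]
  | succ n ih =>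
    rw [findL]
    split_ifs with hc
    · exact ih
    · right
      unfold FI sI pcl
      omega

-- getD on lists
theorem getD_map_range (f : Nat → Int) (N i : Nat) (h : i < N) :
    (((List.range N).map f).getD i 0) = f i := by
  rw [List.getD_eq_getElem?_getD, List.getElem?_map, List.getElem?_range h]
  rfl

-- phase-2 closed-form state: the counter after the downward sweep has frozen
def frozenC (t L : Nat) (m : Int) (j : Nat) : Int :=
  if L < j then 0
  else if j = L then sI t L - m
  else if j = L - 1 ∧ 1 ≤ L then bitI t (L - 1) + 2 * m
  else bitI t j

-- state while still fully splitting: after processing indices 99..n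
def fullC (t n j : Nat) : Int :=
  if n ≤ j then 0 else if j = n - 1 then sI t (n - 1) else bitI t j

def Tc (t L : Nat) (m : Int) (n j : Nat) : Int :=
  if L + 1 ≤ n then fullC t n j else frozenC t L m j

def Tcnt (k : Int) (t L : Nat) (_m : Int) (n : Nat) : Int :=
  if L + 1 ≤ n then FI t n else k

def S2 (k : Int) (t L : Nat) (m : Int) (n : Nat) : List Int × Int :=
  ((List.range 100).map (Tc t L m n), Tcnt k t L m n)

-- generic downward fold over range N
theorem foldl_reverse_range_inv {σ : Type} (f : σ → Nat → σ) (S : Nat → σ) (N : Nat)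
    (hstep : ∀ n, n < N → f (S (n + 1)) n = S n) :
    (List.range N).reverse.foldl f (S N) = S 0 := by
  induction N with
  | zero => simp
  | succ N ih =>
    rw [List.range_succ, List.reverse_append]
    simp only [List.reverse_singleton, List.singleton_append, List.foldl_cons]
    rw [hstep N (by omega)]
    exact ih (fun n hn => hstep n (by omega))

-- phase 1: the first loop writes t's bits and counts them
theorem phase1_aux (target : Int) (n : Nat) (hn : n ≤ 100) :
    (List.range n).foldl (pvLoop1 target) (List.replicate 100 0, 0)
      = ((List.range 100).map (fun j => if j < n then bitI target.natAbs j else 0),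
         pcl target.natAbs n) := by
  induction n with
  | zero =>
    have h1 : (List.range 100).map (fun _ => (0 : Int)) = List.replicate 100 0 := by
      simp [List.map_const']
    have h2 : pcl target.natAbs 0 = 0 := by
      unfold pcl; simp [Nat.mod_one, natOnes_zero]
    simp [h1, h2]
  | succ n ih =>
    rw [List.range_succ, List.foldl_append, ih (by omega)]
    simp only [List.foldl_cons, List.foldl_nil, pvLoop1]
    by_cases h : (target.natAbs).testBit n
    · rw [if_pos h]
      refine Prod.ext ?_ ?_
      · apply List.ext_getElem
        · simp
        · intro j hj1 hj2
          simp only [List.getElem_set, List.getElem_map, List.getElem_range]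
          by_cases hnj : n = j
          · subst hnj
            simp [bitI, h]
          · rw [if_neg hnj]
            by_cases hjlt : j < n
            · rw [if_pos hjlt, if_pos (by omega)]
            · rw [if_neg hjlt, if_neg (by omega)]
      · show pcl target.natAbs n + 1 = pcl target.natAbs (n + 1)
        rw [pcl_succ]
        have hb : bitI target.natAbs n = 1 := by simp [bitI, h]
        rw [hb]
    · rw [if_neg h]
      refine Prod.ext ?_ ?_
      · apply List.ext_getElem
        · simp
        · intro j hj1 hj2
          simp only [List.getElem_map, List.getElem_range]
          by_cases hnj : j = n
          · subst hnj
            rw [if_neg (by omega), if_pos (by omega)]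
            simp [bitI, h]
          · by_cases hjlt : j < n
            · rw [if_pos hjlt, if_pos (by omega)]
            · rw [if_neg hjlt, if_neg (by omega)]
      · show pcl target.natAbs n = pcl target.natAbs (n + 1)
        rw [pcl_succ]
        have hb : bitI target.natAbs n = 0 := by simp [bitI, h]
        rw [hb, add_zero]


theorem getD_set_ne (l : List Int) (i j : Nat) (v : Int) (h : i ≠ j) :
    (l.set i v).getD j 0 = l.getD j 0 := by
  rw [List.getD_eq_getElem?_getD, List.getD_eq_getElem?_getD, List.getElem?_set_ne h]

theorem frozenC_nonneg (t L : Nat) (m : Int) (j : Nat) (hm0 : 0 ≤ m) (hsm : m ≤ sI t L) :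
    0 ≤ frozenC t L m j := by
  unfold frozenC
  have h1 := bitI_nonneg t (L - 1)
  have h2 := bitI_nonneg t j
  split_ifs <;> omega

-- phase 2 single step
theorem phase2_step (k : Int) (t L : Nat) (m : Int)
    (hL : ∀ j, L < j → FI t j ≤ k) (hLlt : 1 ≤ L → k < FI t L)
    (hkt : k ≤ (t : Int)) (hm : m = k - sI t L - pcl t L)
    (hL99 : L ≤ 99) (n : Nat) (hn : n < 100) :
    pvLoop2 k (S2 k t L m (n + 1)) n = S2 k t L m n := by
  have hFs := FI_shift t L
  have hm' : m = k - FI t (L + 1) := by unfold FI at hFs ⊢; omega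
  have hm0 : 0 ≤ m := by have := hL (L + 1) (by omega); omega
  have hsm : m ≤ sI t L := by
    by_cases h1L : 1 ≤ L
    · have := hLlt h1L; unfold FI at this hm'; omega
    · have hL0 : L = 0 := by omega
      subst hL0
      have h1 := hL 1 (by omega)
      rw [FI_one] at h1
      have h2 : sI t 0 = (t : Int) := by
        unfold sI; rw [Nat.shiftRight_zero]
      have h3 : pcl t 0 = 0 := by
        unfold pcl; simp [Nat.mod_one, natOnes_zero]
      rw [hm, h2, h3]; omega
  have hget : ∀ j, j < 100 → ((List.range 100).map (Tc t L m (n + 1))).getD j 0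
      = Tc t L m (n + 1) j := fun j hj => getD_map_range _ _ _ hj
  by_cases hn0 : n = 0
  · -- i = 0: A's loop body does nothing
    subst hn0
    rw [pvLoop2, if_neg (by omega)]
    unfold S2
    by_cases hL0 : L = 0
    · subst hL0
      have h1 := hL 1 (by omega)
      rw [FI_one] at h1
      have hkt' : k = (t : Int) := le_antisymm hkt h1
      have hm00 : m = 0 := by
        have h2 : m = k - FI t 1 := by simpa using hm'
        have := FI_one t; omega
      refine Prod.ext ?_ ?_
      · show (List.range 100).map (Tc t 0 m 1) = (List.range 100).map (Tc t 0 m 0)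
        apply List.map_congr_left
        intro j _
        unfold Tc fullC frozenC
        rw [hm00]
        norm_num
        split_ifs <;> omega
      · show Tcnt k t 0 m 1 = Tcnt k t 0 m 0
        unfold Tcnt
        rw [if_pos (by omega), if_neg (by omega), FI_one, hkt']
    · have hA : ¬(L + 1 ≤ 1) := by omega
      have hB : ¬(L + 1 ≤ 0) := by omega
      refine Prod.ext ?_ ?_
      · show (List.range 100).map (Tc t L m (0 + 1)) = (List.range 100).map (Tc t L m 0)
        apply List.map_congr_left
        intro j _
        unfold Tc
        rw [if_neg (by omega), if_neg (by omega)]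
      · show Tcnt k t L m (0 + 1) = Tcnt k t L m 0
        unfold Tcnt
        rw [if_neg (by omega), if_neg (by omega)]
  · -- i = n ≥ 1
    have hn1 : 1 ≤ n := by omega
    rw [pvLoop2, if_pos (by omega)]
    simp only []
    unfold S2
    rcases lt_trichotomy n L with hcase | hcase | hcase
    · -- frozen no-op region
      have hfr1 : ∀ j, Tc t L m (n + 1) j = frozenC t L m j := by
        intro j; unfold Tc; rw [if_neg (by omega)]
      have hcnt1 : Tcnt k t L m (n + 1) = k := by
        unfold Tcnt; rw [if_neg (by omega)]
      have hfro : 0 ≤ frozenC t L m n := frozenC_nonneg t L m n hm0 hsm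
      have hTc0 : ∀ j, Tc t L m n j = frozenC t L m j := fun j => by
        unfold Tc; rw [if_neg (by omega)]
      have hcnt0 : Tcnt k t L m n = k := by unfold Tcnt; rw [if_neg (by omega)]
      rw [hcnt1, hget n hn, hfr1 n]
      simp only [sub_self]
      rw [min_eq_left hfro]
      simp only [sub_zero, zero_mul, add_zero]
      rw [getD_set_ne _ _ _ _ (show n ≠ n - 1 by omega), hget (n - 1) (by omega),
        hfr1 (n - 1), hcnt0]
      refine Prod.ext ?_ rfl
      apply List.ext_getElem
      · simp
      · intro j hj1 hj2
        simp only [List.getElem_set, List.getElem_map, List.getElem_range, hTc0, hfr1]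
        by_cases h1 : n - 1 = j
        · rw [if_pos h1, h1]
        · rw [if_neg h1]
          by_cases h2 : n = j
          · rw [if_pos h2, h2]
          · rw [if_neg h2]
    · -- n = L : the partial split that freezes the state
      subst hcase
      have hful1 : ∀ j, Tc t n m (n + 1) j = fullC t (n + 1) j := fun j => by
        unfold Tc; rw [if_pos (by omega)]
      have hTc0 : ∀ j, Tc t n m n j = frozenC t n m j := fun j => by
        unfold Tc; rw [if_neg (by omega)]
      have hcnt1 : Tcnt k t n m (n + 1) = FI t (n + 1) := by
        unfold Tcnt; rw [if_pos (by omega)]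
      have hcnt0 : Tcnt k t n m n = k := by unfold Tcnt; rw [if_neg (by omega)]
      have hfn : fullC t (n + 1) n = sI t n := by
        unfold fullC; rw [if_neg (by omega), if_pos (show n = n + 1 - 1 by omega),
          Nat.add_sub_cancel]
      have hfn1 : fullC t (n + 1) (n - 1) = bitI t (n - 1) := by
        unfold fullC; rw [if_neg (by omega), if_neg (by omega)]
      rw [hcnt1, hget n hn, hful1 n, hfn,
        show k - FI t (n + 1) = m from by omega, min_eq_left hsm,
        getD_set_ne _ _ _ _ (show n ≠ n - 1 by omega), hget (n - 1) (by omega),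
        hful1 (n - 1), hfn1, show FI t (n + 1) + m = k from by omega, hcnt0]
      refine Prod.ext ?_ rfl
      apply List.ext_getElem
      · simp
      · intro j hj1 hj2
        simp only [List.getElem_set, List.getElem_map, List.getElem_range, hTc0, hful1]
        by_cases h1 : n - 1 = j
        · subst h1
          rw [if_pos rfl]
          unfold frozenC
          split_ifs <;> omega
        · rw [if_neg h1]
          by_cases h2 : n = j
          · subst h2
            rw [if_pos rfl]
            unfold frozenC
            split_ifs <;> omega
          · rw [if_neg h2]
            unfold fullC frozenC
            split_ifs <;> omega
    · -- L < n : a full split, pieces cascade down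
      have hful1 : ∀ j, Tc t L m (n + 1) j = fullC t (n + 1) j := fun j => by
        unfold Tc; rw [if_pos (by omega)]
      have hful0 : ∀ j, Tc t L m n j = fullC t n j := fun j => by
        unfold Tc; rw [if_pos (by omega)]
      have hcnt1 : Tcnt k t L m (n + 1) = FI t (n + 1) := by
        unfold Tcnt; rw [if_pos (by omega)]
      have hcnt0 : Tcnt k t L m n = FI t n := by
        unfold Tcnt; rw [if_pos (by omega)]
      have hfn : fullC t (n + 1) n = sI t n := by
        unfold fullC; rw [if_neg (by omega), if_pos (show n = n + 1 - 1 by omega),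
          Nat.add_sub_cancel]
      have hfn1 : fullC t (n + 1) (n - 1) = bitI t (n - 1) := by
        unfold fullC; rw [if_neg (by omega), if_neg (by omega)]
      have hs : sI t (n - 1) = 2 * sI t n + bitI t (n - 1) := by
        have h5 := sI_succ t (n - 1)
        rw [show n - 1 + 1 = n from by omega] at h5
        exact h5
      have hkey : sI t n ≤ k - FI t (n + 1) := by
        have h1 := hL n hcase
        have h2 := FI_shift t n
        unfold FI at h1
        omega
      have hcnteq : FI t (n + 1) + sI t n = FI t n := by
        have h3 := sI_succ t n
        have h4 := pcl_succ t n
        unfold FI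
        omega
      rw [hcnt1, hget n hn, hful1 n, hfn, min_eq_right hkey]
      simp only [sub_self]
      rw [getD_set_ne _ _ _ _ (show n ≠ n - 1 by omega), hget (n - 1) (by omega),
        hful1 (n - 1), hfn1, show bitI t (n - 1) + sI t n * 2 = sI t (n - 1) from by omega,
        hcnteq, hcnt0]
      refine Prod.ext ?_ rfl
      apply List.ext_getElem
      · simp
      · intro j hj1 hj2
        simp only [List.getElem_set, List.getElem_map, List.getElem_range, hful0, hful1]
        by_cases h1 : n - 1 = j
        · subst h1
          rw [if_pos rfl]
          unfold fullC
          split_ifs <;> omega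
        · rw [if_neg h1]
          by_cases h2 : n = j
          · subst h2
            rw [if_pos rfl]
            unfold fullC
            split_ifs <;> omega
          · rw [if_neg h2]
            unfold fullC
            split_ifs <;> omega


-- the flatMap of a bit-selected singleton family is a filter-map
theorem flatMap_bit (t : Nat) (l : List Nat) (f : Nat → Int) :
    l.flatMap (fun j => if t.testBit j then [f j] else [])
      = (l.filter (fun j => t.testBit j)).map f := by
  induction l with
  | nil => rfl
  | cons x xs ih =>
    rw [List.flatMap_cons, List.filter_cons]
    by_cases h : t.testBit x <;> simp [h, ih]

theorem flatMap_congr' (l : List Nat) (f g : Nat → List Int) (h : ∀ x ∈ l, f x = g x) :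
    l.flatMap f = l.flatMap g := by
  induction l with
  | nil => rfl
  | cons x xs ih =>
    rw [List.flatMap_cons, List.flatMap_cons, h x (by simp),
      ih (fun y hy => h y (by simp [hy]))]

theorem selectPow2_spec_aux : ∀ (k target : Int), Dom_selectPow2 k target →
    selectPow2 k target = selectPow2_alt k target := by
  intro k target hdom
  simp only [selectPow2, selectPow2_alt]
  by_cases hg : k > target ∨ k < (natOnes target.natAbs : Int)
  · rw [if_pos hg, if_pos hg]
  · rw [if_neg hg, if_neg hg]
    push_neg at hg
    obtain ⟨hkt0, hpk⟩ := hg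
    have htnn : 0 ≤ target := le_trans (le_trans (Int.natCast_nonneg _) hpk) hkt0
    set t := target.natAbs with htdef
    have htc : (t : Int) = target := Int.natAbs_of_nonneg htnn
    have hdom31 : target ≤ 2 ^ 31 := by
      unfold Dom_selectPow2 pvDomInt at hdom
      simp only [Bool.and_eq_true, decide_eq_true_eq] at hdom
      exact_mod_cast hdom.2.2
    have ht31 : t ≤ 2 ^ 31 := by omega
    have ht99 : t < 2 ^ 99 := lt_of_le_of_lt ht31 (by norm_num)
    have hsize : t.size ≤ 99 := Nat.size_le.mpr ht99
    set L := findL k t t.size with hLdef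
    have hLs : L ≤ t.size := findL_le k t t.size
    have hL99 : L ≤ 99 := le_trans hLs hsize
    have hkt : k ≤ (t : Int) := by omega
    have hL : ∀ j, L < j → FI t j ≤ k := by
      intro j hj
      rcases Nat.lt_or_ge t.size j with hjs2 | hjs
      · have hlt : t < 2 ^ j := Nat.size_le.mp (by omega)
        unfold FI
        rw [sI_zero_of_lt t j hlt, pcl_of_lt t j hlt]
        simpa using hpk
      · exact findL_ge k t t.size j hj hjs
    have hLlt : 1 ≤ L → k < FI t L := by
      intro h1
      rcases findL_lt k t t.size with h0 | hlt
      · omega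
      · exact hlt
    set m := k - sI t L - pcl t L with hmdef
    have hFs := FI_shift t L
    have hm0 : 0 ≤ m := by
      have h3 := hL (L + 1) (by omega)
      omega
    have hsm : m ≤ sI t L := by
      by_cases h1L : 1 ≤ L
      · have := hLlt h1L
        unfold FI at this
        omega
      · have hL0 : L = 0 := by omega
        have h1 := hL 1 (by omega)
        rw [FI_one] at h1
        have h2 : sI t 0 = (t : Int) := by unfold sI; rw [Nat.shiftRight_zero]
        have h3 : pcl t 0 = 0 := by unfold pcl; simp [Nat.mod_one, natOnes_zero]
        rw [hL0] at hmdef ⊢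
        omega
    -- A's first two loops compute the frozen closed form
    have hphase1 : (List.range 100).foldl (pvLoop1 target) (List.replicate 100 0, 0)
        = S2 k t L m 100 := by
      rw [phase1_aux target 100 (le_refl _)]
      unfold S2
      refine Prod.ext ?_ ?_
      · apply List.map_congr_left
        intro j hj
        rw [List.mem_range] at hj
        rw [if_pos hj]
        unfold Tc fullC
        rw [if_pos (by omega), if_neg (by omega)]
        by_cases hj99 : j = 100 - 1
        · rw [if_pos hj99, hj99]
          rw [bitI_zero_of_lt t (100 - 1) (by norm_num; omega),
            sI_zero_of_lt t (100 - 1) (by norm_num; omega)]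
        · rw [if_neg hj99]
      · show pcl t 100 = Tcnt k t L m 100
        unfold Tcnt
        rw [if_pos (by omega)]
        unfold FI
        rw [sI_zero_of_lt t 100 (lt_of_lt_of_le ht99 (by norm_num))]
        ring
    have hphase2 : (List.range 100).reverse.foldl (pvLoop2 k) (S2 k t L m 100)
        = S2 k t L m 0 :=
      foldl_reverse_range_inv (pvLoop2 k) (S2 k t L m) 100
        (fun n hn => phase2_step k t L m hL hLlt hkt hmdef hL99 n hn)
    rw [hphase1, hphase2]
    rw [PySem.List.foldl_append_eq_flatMap, List.nil_append]
    have hG : (List.range 100).flatMap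
          (fun i => List.replicate ((S2 k t L m 0).1.getD i 0).toNat ((2 : Int) ^ i))
        = (List.range 100).flatMap
          (fun i => List.replicate (frozenC t L m i).toNat ((2 : Int) ^ i)) := by
      apply flatMap_congr'
      intro i hi
      rw [List.mem_range] at hi
      unfold S2
      rw [getD_map_range _ _ _ hi]
      have : Tc t L m 0 i = frozenC t L m i := by unfold Tc; rw [if_neg (by omega)]
      rw [this]
    rw [hG]
    have hsplit : (List.range 100).flatMap
          (fun i => List.replicate (frozenC t L m i).toNat ((2 : Int) ^ i))
        = (List.range (L + 1)).flatMap
          (fun i => List.replicate (frozenC t L m i).toNat ((2 : Int) ^ i)) := by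
      rw [show (100 : Nat) = (L + 1) + (99 - L) from by omega, List.range_add,
        List.flatMap_append]
      have hz : ((List.range (99 - L)).map (fun i => L + 1 + i)).flatMap
          (fun i => List.replicate (frozenC t L m i).toNat ((2 : Int) ^ i)) = [] := by
        rw [List.flatMap_eq_nil_iff]
        intro x hx
        rw [List.mem_map] at hx
        obtain ⟨i, _, rfl⟩ := hx
        have : frozenC t L m (L + 1 + i) = 0 := by
          unfold frozenC; rw [if_pos (by omega)]
        rw [this]
        simp
      rw [hz, List.append_nil]
    rw [hsplit]
    by_cases ht0 : target = 0
    · rw [if_pos ht0]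
      have ht0' : t = 0 := by omega
      have hts0 : t.size = 0 := by rw [ht0']; simp
      have hL0 : L = 0 := by rw [hLdef, hts0]; rfl
      have hk0 : k = 0 := by
        rw [ht0'] at hpk
        simp [natOnes_zero] at hpk
        omega
      have hm00 : m = 0 := by
        rw [hmdef, hL0, ht0']
        have h1 : sI 0 0 = 0 := rfl
        have h2 : pcl 0 0 = 0 := by unfold pcl; simp [natOnes_zero]
        rw [h1, h2]
        omega
      rw [hL0]
      simp only [Nat.zero_add]
      rw [List.range_one, List.flatMap_cons, List.flatMap_nil, List.append_nil]
      have hfz : frozenC t 0 m 0 = 0 := by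
        unfold frozenC
        rw [if_neg (by omega), if_pos rfl, ht0', hm00]
        simp [sI]
      rw [hfz]
      simp
    · rw [if_neg ht0]
      have hmfold : k - ((t >>> L : Nat) : Int) - (natOnes (t % 2 ^ L) : Int) = m := by
        rw [hmdef]
        rfl
      rw [hmfold]
      by_cases hL1 : 1 ≤ L
      · rw [if_pos hL1]
        rw [show L + 1 = (L - 1) + 2 from by omega, List.range_add, List.flatMap_append]
        have hr2 : (List.range 2).map (fun i => L - 1 + i) = [L - 1, L] := by
          rw [show List.range 2 = [0, 1] from rfl]
          simp [Nat.sub_add_cancel hL1]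
        rw [hr2, List.flatMap_cons, List.flatMap_cons, List.flatMap_nil, List.append_nil]
        have hlow : (List.range (L - 1)).flatMap
              (fun i => List.replicate (frozenC t L m i).toNat ((2 : Int) ^ i))
            = (List.range (L - 1)).foldl
              (fun res i => if t.testBit i then res ++ [(2 : Int) ^ i] else res) [] := by
          rw [PySem.List.foldl_append_if, List.nil_append, ← flatMap_bit]
          apply flatMap_congr'
          intro i hi
          rw [List.mem_range] at hi
          have hfz : frozenC t L m i = bitI t i := by
            unfold frozenC
            rw [if_neg (by omega), if_neg (by omega), if_neg (by omega)]
          rw [hfz]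
          unfold bitI
          by_cases hb : t.testBit i
          · simp [hb]
          · simp [hb]
        rw [hlow]
        have hmid : List.replicate (frozenC t L m (L - 1)).toNat ((2 : Int) ^ (L - 1))
            = List.replicate ((if t.testBit (L - 1) then (1 : Int) else 0) + 2 * m).toNat
              ((2 : Int) ^ (L - 1)) := by
          unfold frozenC
          rw [if_neg (by omega), if_neg (by omega),
            if_pos (⟨rfl, hL1⟩ : L - 1 = L - 1 ∧ 1 ≤ L)]
          unfold bitI
          rfl
        rw [hmid]
        have htail : List.replicate (frozenC t L m L).toNat ((2 : Int) ^ L)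
            = List.replicate (((t >>> L : Nat) : Int) - m).toNat ((2 : Int) ^ L) := by
          unfold frozenC
          rw [if_neg (by omega), if_pos rfl]
          rfl
        rw [htail, List.append_assoc]
      · rw [if_neg hL1]
        have hL0 : L = 0 := by omega
        rw [hL0]
        simp only [Nat.zero_add]
        rw [List.range_one, List.flatMap_cons, List.flatMap_nil, List.append_nil]
        have hfz : frozenC t 0 m 0 = sI t 0 - m := by
          unfold frozenC
          rw [if_neg (by omega), if_pos rfl]
        rw [hfz]
        simp [sI]



-- ===== VERDICT (by name: the statement is the Claim_ definition above) =====
theorem selectPow2_spec : Claim_equal_selectPow2 := by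
  intro k target h
  exact selectPow2_spec_aux k target h
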